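-- pv_equiv track=rewrite | github.com/aequorea/zed | zed.py | do_kill
-- ===== SOURCE A (Python) =====
-- def backscan(n, buf, p):
--     n = -n
--     while n:
--         if p < 0:
--             return 0
--         p -= 1
--         if buf[p] == '\n':
--             n -= 1
--     return p+1
--
-- def do_kill(n, buf, p):
--     if n < 0:
--         mp = backscan(n-1, buf, p)
--         chars = p - mp
--         p = mp
--         while chars:
--             buf.pop(p)
--             chars -= 1
--     else:
--         while n:
--             if p >= len(buf):
--                 return p
--             if buf[p] == '\n':
--                 n -= 1
--             buf.pop(p)
--     return p
-- ===== SOURCE B (Python) =====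
-- def do_kill(n, buf, p):
--     if n >= 0:
--         # find end of the doomed region in one scan, then delete it with one slice-del
--         e = p
--         while n and e < len(buf):
--             if buf[e] == '\n':
--                 n -= 1
--             e += 1
--         del buf[p:e]
--         return p
--     # backward: skip |n|+1 newlines; the kill starts just after the last one skipped
--     m = 1 - n
--     i = p
--     while m and i > 0:
--         i -= 1
--         if buf[i] == '\n':
--             m -= 1
--     start = i + 1 if m == 0 else 0
--     del buf[start:p]
--     return start
-- ===== Notes on version B (the rewrite author's own statement) =====
-- stated objective: faster
-- what changed: A deletes one element at a time with repeated buf.pop (each O(len)); B first locates the boundary of the doomed region in a single scan and removes it with one slice-deletion del buf[start:end], and computes the backward start with a single guarded scan instead of A's wraparound sentinel loop.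
-- outside the precondition, e.g. on do_kill(2, ['\n', '\n'], -1): A returns -1, B returns -1; on do_kill(-1, [], 0): A raises IndexError, B returns 0; on do_kill(1, ['a'], -1): A raises IndexError, B returns -1
import Mathlib
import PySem

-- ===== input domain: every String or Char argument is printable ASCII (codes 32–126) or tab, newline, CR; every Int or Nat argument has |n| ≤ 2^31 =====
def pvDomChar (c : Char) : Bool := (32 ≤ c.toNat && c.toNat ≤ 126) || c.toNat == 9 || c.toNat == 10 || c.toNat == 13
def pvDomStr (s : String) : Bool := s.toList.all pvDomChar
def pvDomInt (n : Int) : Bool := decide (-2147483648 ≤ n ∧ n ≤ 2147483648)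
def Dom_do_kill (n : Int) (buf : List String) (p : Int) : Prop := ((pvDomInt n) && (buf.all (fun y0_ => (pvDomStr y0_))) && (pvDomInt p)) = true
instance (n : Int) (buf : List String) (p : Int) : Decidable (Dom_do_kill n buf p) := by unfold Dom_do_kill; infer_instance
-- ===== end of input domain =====

-- B replaces A's repeated buf.pop deletions (O(k*len)) by one boundary scan plus a single
-- slice-deletion (O(len)).  Both programs mutate buf; the equivalence proved here is about
-- the RETURN value (the new point position); B performs the same net mutation on Pre_.

-- ===== PORT A =====
-- while n: if p < 0: return 0; p -= 1; if buf[p] == '\n': n -= 1   (then return p+1)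
def backscanLoop (buf : List String) (n p : Int) : Int :=
  if n = 0 then p + 1
  else if p < 0 then 0
  else
    backscanLoop buf (if PySem.List.pyGet? buf (p - 1) = some "\n" then n - 1 else n) (p - 1)
termination_by (p + 1).toNat
decreasing_by omega

def backscan (n : Int) (buf : List String) (p : Int) : Int :=
  backscanLoop buf (-n) p

-- while n: if p >= len(buf): return p; if buf[p] == '\n': n -= 1; buf.pop(p)
def killFwdLoop (n : Int) (buf : List String) (p : Int) : Int :=
  if n = 0 then p
  else if p ≥ (buf.length : Int) then p
  else
    match h : PySem.List.pop? buf p with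
    | none => p          -- Python would raise IndexError here (excluded by Pre_)
    | some r => killFwdLoop (if PySem.List.pyGet? buf p = some "\n" then n - 1 else n) r.2 p
termination_by buf.length
decreasing_by have := PySem.List.length_of_pop?_eq_some buf h; omega

def do_kill (n : Int) (buf : List String) (p : Int) : Int :=
  if n < 0 then
    let mp := backscan (n - 1) buf p
    -- chars = p - mp; p = mp; while chars: buf.pop(p); chars -= 1   — mutates buf only
    mp
  else
    killFwdLoop n buf p

-- ===== PORT B =====
-- e = p; while n and e < len(buf): if buf[e]=='\n': n -= 1; e += 1   (end of the doomed region)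
def fwdEnd (buf : List String) (n e : Int) : Int :=
  if n ≠ 0 ∧ e < (buf.length : Int) then
    fwdEnd buf (if PySem.List.pyGet? buf e = some "\n" then n - 1 else n) (e + 1)
  else e
termination_by ((buf.length : Int) - e).toNat
decreasing_by omega

-- i = p; while m and i > 0: i -= 1; if buf[i]=='\n': m -= 1   (returns final (i, m))
def backLoop (buf : List String) (m i : Int) : Int × Int :=
  if m ≠ 0 ∧ 0 < i then
    backLoop buf (if PySem.List.pyGet? buf (i - 1) = some "\n" then m - 1 else m) (i - 1)
  else (i, m)
termination_by i.toNat
decreasing_by omega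

def do_kill_alt (n : Int) (buf : List String) (p : Int) : Int :=
  if 0 ≤ n then
    let _e := fwdEnd buf n p   -- only delimits the slice-deletion del buf[p:_e]
    p
  else
    let im := backLoop buf (1 - n) p
    if im.2 = 0 then im.1 + 1 else 0
    -- del buf[start:p]  — mutates buf only

-- ===== PRECONDITION & SPEC =====
-- Pre_ excludes inputs where Python A raises IndexError (n<0 with an empty buffer or a point
-- outside [0,len], n>0 with a negative point that underruns the buffer) and, with them, the
-- remaining negative-point inputs where A's negative-index wraparound pops from the buffer's
-- end: A's return value there is defensible but its mutation is an accident of wraparound.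
def Pre_do_kill (n : Int) (buf : List String) (p : Int) : Prop :=
  (0 ≤ n ∧ 0 ≤ p) ∨ n = 0 ∨ (n < 0 ∧ 0 ≤ p ∧ p ≤ (buf.length : Int) ∧ buf ≠ [])
instance (n : Int) (buf : List String) (p : Int) : Decidable (Pre_do_kill n buf p) := by
  unfold Pre_do_kill; infer_instance

def pvWitness_do_kill : Int × List String × Int := (1, ["a", "\n", "b"], 0)

def Spec_do_kill (n : Int) (buf : List String) (p : Int) (out : Int) : Prop := out = do_kill_alt n buf p
instance (n : Int) (buf : List String) (p : Int) (out : Int) : Decidable (Spec_do_kill n buf p out) := by unfold Spec_do_kill; infer_instance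

-- ===== CLAIM (what is proved, stated in full; the proofs are below) =====
def Claim_equal_do_kill : Prop := ∀ (n : Int) (buf : List String) (p : Int), Dom_do_kill n buf p → Pre_do_kill n buf p → Spec_do_kill n buf p (do_kill n buf p)

-- ===== LEMMAS AND PROOFS =====

-- A's forward pop-loop never moves the point: it returns p on every input.
theorem killFwdLoop_eq_aux (k : Nat) : ∀ (n : Int) (buf : List String) (p : Int),
    buf.length ≤ k → killFwdLoop n buf p = p := by
  induction k with
  | zero =>
      intro n buf p hk
      have hb : buf = [] := List.length_eq_zero_iff.mp (by omega)
      subst hb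
      rw [killFwdLoop]
      by_cases h0 : n = 0
      · rw [if_pos h0]
      · rw [if_neg h0]
        by_cases h1 : p ≥ ((List.length ([] : List String) : Int))
        · rw [if_pos h1]
        · rw [if_neg h1]
          have hp : PySem.List.pop? ([] : List String) p = none := by
            unfold PySem.List.pop?
            cases hx : PySem.List.pyIdx? (List.length ([] : List String)) p <;> simp_all
          split
          · rfl
          · rename_i r hr
            rw [hp] at hr
            cases hr
  | succ k ih =>
      intro n buf p hk
      rw [killFwdLoop]
      by_cases h0 : n = 0
      · rw [if_pos h0]
      · rw [if_neg h0]
        by_cases h1 : p ≥ ((buf.length : Int))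
        · rw [if_pos h1]
        · rw [if_neg h1]
          split
          · rfl
          · rename_i r hr
            exact ih _ r.2 p
              (by have := PySem.List.length_of_pop?_eq_some buf hr; omega)

theorem killFwdLoop_eq (n : Int) (buf : List String) (p : Int) : killFwdLoop n buf p = p :=
  killFwdLoop_eq_aux buf.length n buf p le_rfl

-- A's backward sentinel loop computes B's guarded scan followed by B's start formula.
theorem backscanLoop_eq_backLoop_aux (buf : List String) (k : Nat) :
    ∀ (m i : Int), 0 ≤ m → i.toNat ≤ k →
      backscanLoop buf m i = (if (backLoop buf m i).2 = 0 then (backLoop buf m i).1 + 1 else 0) := by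
  induction k with
  | zero =>
      intro m i hm hk
      have hi : i ≤ 0 := by omega
      rw [backLoop, if_neg (by omega : ¬ (m ≠ 0 ∧ 0 < i))]
      by_cases hm0 : m = 0
      · subst hm0; rw [backscanLoop]; simp
      · rw [if_neg hm0, backscanLoop, if_neg hm0]
        rcases lt_or_eq_of_le hi with hlt | heq
        · rw [if_pos hlt]
        · subst heq
          rw [if_neg (by omega : ¬ (0 : Int) < 0), backscanLoop]
          split
          · omega
          · rw [if_pos (by omega : (0 : Int) - 1 < 0)]
  | succ k ih =>
      intro m i hm hk
      by_cases hg : m ≠ 0 ∧ 0 < i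
      · obtain ⟨hm0, hi⟩ := hg
        rw [backLoop, if_pos (show m ≠ 0 ∧ 0 < i from ⟨hm0, hi⟩)]
        rw [backscanLoop, if_neg hm0, if_neg (by omega : ¬ i < 0)]
        exact ih _ (i - 1) (by split <;> omega) (by omega)
      · rw [backLoop, if_neg hg]
        by_cases hm0 : m = 0
        · subst hm0; rw [backscanLoop]; simp
        · have hi : i ≤ 0 := by omega
          rw [if_neg hm0, backscanLoop, if_neg hm0]
          rcases lt_or_eq_of_le hi with hlt | heq
          · rw [if_pos hlt]
          · subst heq
            rw [if_neg (by omega : ¬ (0 : Int) < 0), backscanLoop]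
            split
            · omega
            · rw [if_pos (by omega : (0 : Int) - 1 < 0)]

theorem backscanLoop_eq_backLoop (buf : List String) (m i : Int) (hm : 0 ≤ m) :
    backscanLoop buf m i = (if (backLoop buf m i).2 = 0 then (backLoop buf m i).1 + 1 else 0) :=
  backscanLoop_eq_backLoop_aux buf i.toNat m i hm le_rfl

-- ===== VERDICT (by name: the statement is the Claim_ definition above) =====
theorem do_kill_spec : Claim_equal_do_kill := by
  intro n buf p _ _
  unfold Spec_do_kill do_kill do_kill_alt
  by_cases hn : n < 0
  · rw [if_pos hn, if_neg (by omega : ¬ 0 ≤ n)]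
    unfold backscan
    rw [show -(n - 1) = 1 - n by ring]
    exact backscanLoop_eq_backLoop buf (1 - n) p (by omega)
  · rw [if_neg hn, if_pos (by omega : 0 ≤ n)]
    exact killFwdLoop_eq n buf p
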